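-- pv_equiv track=rewrite | github.com/CMPT-371/CMPT371_A3_BroadSide | src/gui.py | _connected_segment
-- ===== SOURCE A (Python) =====
-- def _connected_segment(
--     sorted_cells: list[tuple[int, int]], target: int, axis: int
-- ) -> list[tuple[int, int]]:
--     """Return the contiguous run of cells (sorted by `axis`) that contains `target`.
--
--     Args:
--         sorted_cells: Cells sorted by their `axis` coordinate.
--         target:       The axis-coordinate value that must be in the run.
--         axis:         0 = row axis, 1 = col axis.
--     """
--     indices = [c[axis] for c in sorted_cells]
--     if target not in indices:
--         return []
--     pos = indices.index(target)
--     start = pos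
--     end = pos
--     while start > 0 and indices[start - 1] == indices[start] - 1:
--         start -= 1
--     while end < len(indices) - 1 and indices[end + 1] == indices[end] + 1:
--         end += 1
--     return sorted_cells[start : end + 1]
-- ===== SOURCE B (Python) =====
-- def _connected_segment(
--     sorted_cells: list[tuple[int, int]], target: int, axis: int
-- ) -> list[tuple[int, int]]:
--     """Single forward pass: track the start of the current maximal run of
--     consecutive axis-values; once the first occurrence of `target` is seen,
--     return that run as soon as it ends (or at the end of the list)."""
--     run_start = 0
--     pos = None
--     prev = None
--     for i, c in enumerate(sorted_cells):
--         v = c[axis]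
--         if prev is not None and v != prev + 1:
--             if pos is not None:
--                 return sorted_cells[run_start:i]
--             run_start = i
--         if pos is None and v == target:
--             pos = i
--         prev = v
--     return [] if pos is None else sorted_cells[run_start:]
-- ===== Notes on version B (the rewrite author's own statement) =====
-- stated objective: alternative
-- what changed: Replaces A's membership test + .index scan + two expanding while-loops with one forward pass that maintains the start of the current maximal consecutive run and returns the run as soon as it closes after the first occurrence of target.
import Mathlib
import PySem

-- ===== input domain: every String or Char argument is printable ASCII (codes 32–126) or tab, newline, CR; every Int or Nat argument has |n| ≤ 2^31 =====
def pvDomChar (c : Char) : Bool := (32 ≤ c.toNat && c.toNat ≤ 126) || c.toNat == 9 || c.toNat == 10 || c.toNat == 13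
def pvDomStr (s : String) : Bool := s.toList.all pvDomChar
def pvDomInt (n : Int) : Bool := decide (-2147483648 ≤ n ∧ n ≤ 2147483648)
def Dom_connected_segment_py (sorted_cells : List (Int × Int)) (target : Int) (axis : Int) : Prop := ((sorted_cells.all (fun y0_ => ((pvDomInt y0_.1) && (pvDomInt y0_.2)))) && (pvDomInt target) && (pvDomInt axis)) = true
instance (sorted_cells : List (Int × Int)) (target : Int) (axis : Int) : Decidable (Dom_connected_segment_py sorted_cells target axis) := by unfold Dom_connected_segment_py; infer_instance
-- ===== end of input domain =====

-- B replaces A's membership test + .index scan + two expanding while-loops by ONE forward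
-- pass that tracks the start of the current maximal consecutive run (objective: alternative).

-- ===== PORT A =====
-- c[axis] on a pair: exact for axis ∈ {0, 1, -1, -2} (guaranteed by Pre_ when the list is
-- nonempty); for any other axis Python raises IndexError, which Pre_ excludes.
def pvProj (axis : Int) (c : Int × Int) : Int :=
  if axis = 0 ∨ axis = -2 then c.1 else c.2

-- while start > 0 and indices[start-1] == indices[start] - 1: start -= 1
-- (both indices are in range there, so List.getD is exact)
def pvGoStart (ind : List Int) : Nat → Nat
  | 0 => 0
  | s + 1 => if ind.getD s 0 = ind.getD (s + 1) 0 - 1 then pvGoStart ind s else s + 1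

-- while end < len(indices) - 1 and indices[end+1] == indices[end] + 1: end += 1
-- (fuel ≥ number of iterations; both indices are in range there, so List.getD is exact)
def pvGoEnd (ind : List Int) : Nat → Nat → Nat
  | 0, e => e
  | f + 1, e =>
    if e < ind.length - 1 ∧ ind.getD (e + 1) 0 = ind.getD e 0 + 1 then pvGoEnd ind f (e + 1)
    else e

def connected_segment_py (sorted_cells : List (Int × Int)) (target : Int) (axis : Int) : List (Int × Int) :=
  -- indices = [c[axis] for c in sorted_cells]
  let indices := sorted_cells.map (pvProj axis)
  -- `if target not in indices: return []` then `pos = indices.index(target)`: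
  -- index? is the first-occurrence index, none exactly when `target not in indices`
  match PySem.List.index? indices target with
  | none => []
  | some pos =>
    let start := pvGoStart indices pos
    let e := pvGoEnd indices indices.length pos
    -- sorted_cells[start : e + 1] with 0 ≤ start ≤ e + 1 ≤ len: exact
    (sorted_cells.drop start).take (e + 1 - start)

-- ===== PORT B =====
-- the for-loop of Source B: state (i, run_start, pos, prev); an early return returns the slice
def pvScan (cells : List (Int × Int)) (target axis : Int) :
    List (Int × Int) → Nat → Nat → Option Nat → Option Int → List (Int × Int)
  | [], _i, rs, pos, _prev => if pos.isSome then cells.drop rs else []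
  | c :: rest, i, rs, pos, prev =>
    let v := pvProj axis c
    match prev with
    | some p =>
      if v ≠ p + 1 then
        if pos.isSome then (cells.drop rs).take (i - rs)   -- return sorted_cells[run_start:i]
        else pvScan cells target axis rest (i + 1) i (if v = target then some i else none) (some v)
      else
        pvScan cells target axis rest (i + 1) rs
          (if pos = none ∧ v = target then some i else pos) (some v)
    | none =>
        pvScan cells target axis rest (i + 1) rs
          (if pos = none ∧ v = target then some i else pos) (some v)

def connected_segment_py_alt (sorted_cells : List (Int × Int)) (target : Int) (axis : Int) : List (Int × Int) :=
  pvScan sorted_cells target axis sorted_cells 0 0 none none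

-- ===== PRECONDITION & SPEC =====
-- Pre_ excludes exactly the inputs on which Python's c[axis] raises IndexError:
-- a nonempty list with axis outside {0, 1, -1, -2}.
def Pre_connected_segment_py (sorted_cells : List (Int × Int)) (target : Int) (axis : Int) : Prop :=
  sorted_cells = [] ∨ axis = 0 ∨ axis = 1 ∨ axis = -1 ∨ axis = -2

instance (sorted_cells : List (Int × Int)) (target : Int) (axis : Int) : Decidable (Pre_connected_segment_py sorted_cells target axis) := by
  unfold Pre_connected_segment_py; infer_instance

def pvWitness_connected_segment_py : (List (Int × Int)) × Int × Int :=
  ([(1, 7), (2, 9), (4, 4)], 2, 0)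

def Spec_connected_segment_py (sorted_cells : List (Int × Int)) (target : Int) (axis : Int) (out : List (Int × Int)) : Prop := out = connected_segment_py_alt sorted_cells target axis
instance (sorted_cells : List (Int × Int)) (target : Int) (axis : Int) (out : List (Int × Int)) : Decidable (Spec_connected_segment_py sorted_cells target axis out) := by unfold Spec_connected_segment_py; infer_instance

-- ===== CLAIM (what is proved, stated in full; the proofs are below) =====
def Claim_equal_connected_segment_py : Prop := ∀ (sorted_cells : List (Int × Int)) (target : Int) (axis : Int), Dom_connected_segment_py sorted_cells target axis → Pre_connected_segment_py sorted_cells target axis → Spec_connected_segment_py sorted_cells target axis (connected_segment_py sorted_cells target axis)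

-- ===== LEMMAS AND PROOFS =====

theorem pvGoStart_succ_run {ind : List Int} {s : Nat}
    (h : ind.getD (s + 1) 0 = ind.getD s 0 + 1) :
    pvGoStart ind (s + 1) = pvGoStart ind s := by
  simp only [pvGoStart]
  rw [if_pos (by omega)]

theorem pvGoStart_succ_break {ind : List Int} {s : Nat}
    (h : ind.getD (s + 1) 0 ≠ ind.getD s 0 + 1) :
    pvGoStart ind (s + 1) = s + 1 := by
  simp only [pvGoStart]
  rw [if_neg (by omega)]

theorem pvGoEnd_eq (ind : List Int) :
    ∀ (f e m : Nat), e ≤ m → m < ind.length → m - e ≤ f →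
    (∀ j, e ≤ j → j < m → ind.getD (j + 1) 0 = ind.getD j 0 + 1) →
    (m = ind.length - 1 ∨ ind.getD (m + 1) 0 ≠ ind.getD m 0 + 1) →
    pvGoEnd ind f e = m := by
  intro f
  induction f with
  | zero =>
    intro e m h1 _ h3 _ _
    have : e = m := by omega
    simp [pvGoEnd, this]
  | succ f ih =>
    intro e m h1 h2 h3 hrun hstop
    by_cases he : e = m
    · subst he
      simp only [pvGoEnd]
      rw [if_neg]
      rintro ⟨hlt, heq⟩
      rcases hstop with h | h
      · omega
      · exact h heq
    · have hlt : e < m := by omega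
      simp only [pvGoEnd]
      rw [if_pos ⟨by omega, hrun e le_rfl hlt⟩]
      exact ih (e + 1) m (by omega) h2 (by omega) (fun j hj hj' => hrun j (by omega) hj') hstop

theorem pv_index?_first {ind : List Int} {t : Int} :
    ∀ {q : Nat}, ind[q]? = some t → t ∉ ind.take q → PySem.List.index? ind t = some q := by
  induction ind with
  | nil => intro q hq _; simp at hq
  | cons a l ih =>
    intro q hq hnot
    cases q with
    | zero =>
      simp at hq
      subst hq
      simp [PySem.List.index?_eq_idxOf?, List.idxOf?_cons]
    | succ q =>
      simp only [List.take_succ_cons, List.mem_cons, not_or] at hnot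
      have hne : a ≠ t := fun h => hnot.1 h.symm
      have := ih (q := q) (by simpa using hq) hnot.2
      simp only [PySem.List.index?_eq_idxOf?] at this ⊢
      simp [List.idxOf?_cons, hne, this]

-- main invariant: any reachable state of B's scan already determines A's answer
theorem pvScan_eq (cells : List (Int × Int)) (target axis : Int) :
    ∀ (rest : List (Int × Int)) (i rs : Nat) (pos : Option Nat) (prev : Option Int),
    rest = cells.drop i →
    (i = 0 → rs = 0 ∧ prev = none) →
    (∀ k, i = k + 1 → k < cells.length ∧
        prev = some ((cells.map (pvProj axis)).getD k 0) ∧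
        rs = pvGoStart (cells.map (pvProj axis)) k) →
    (∀ q, pos = some q → q < i ∧ q < cells.length ∧
        (cells.map (pvProj axis)).getD q 0 = target ∧
        target ∉ (cells.map (pvProj axis)).take q ∧
        pvGoStart (cells.map (pvProj axis)) q = rs ∧
        (∀ j, q ≤ j → j + 1 < i →
          (cells.map (pvProj axis)).getD (j + 1) 0 = (cells.map (pvProj axis)).getD j 0 + 1)) →
    (pos = none → target ∉ (cells.map (pvProj axis)).take i) →
    pvScan cells target axis rest i rs pos prev = connected_segment_py cells target axis := by
  intro rest
  induction rest with
  | nil =>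
    intro i rs pos prev h1 _ _ hpos hnone
    have hlen : cells.length ≤ i := by
      have := congrArg List.length h1
      simp [List.length_drop] at this
      omega
    have hmaplen : (cells.map (pvProj axis)).length = cells.length := by simp
    cases pos with
    | none =>
      have ht : target ∉ cells.map (pvProj axis) := by
        have := hnone rfl
        rwa [List.take_of_length_le (by omega)] at this
      have hidx : List.idxOf? target (cells.map (pvProj axis)) = none :=
        List.idxOf?_eq_none_iff.mpr ht
      simp [pvScan, connected_segment_py, hidx]
    | some q =>
      obtain ⟨hqi, hqlen, hval, hnotin, hgs, hcont⟩ := hpos q rfl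
      have hq' : q < (cells.map (pvProj axis)).length := by omega
      have hget : (cells.map (pvProj axis))[q]? = some target := by
        rw [List.getElem?_eq_getElem hq']
        have h2 := List.getD_eq_getElem (cells.map (pvProj axis)) 0 hq'
        rw [hval] at h2
        exact congrArg some h2.symm
      have hidx : PySem.List.index? (cells.map (pvProj axis)) target = some q :=
        pv_index?_first hget hnotin
      have hend : pvGoEnd (cells.map (pvProj axis)) (cells.map (pvProj axis)).length q
          = cells.length - 1 := by
        apply pvGoEnd_eq
        · omega
        · omega
        · omega
        · intro j hj hj'
          exact hcont j hj (by omega)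
        · left; omega
      simp only [connected_segment_py, hidx, hend, hgs]
      have harith : cells.length - 1 + 1 - rs = cells.length - rs := by omega
      rw [harith]
      have htake : (cells.drop rs).take (cells.length - rs) = cells.drop rs := by
        apply List.take_of_length_le
        simp
      simp [pvScan, htake]
  | cons c rest' ih =>
    intro i rs pos prev h1 hi0 hik hpos hnone
    have hget : cells[i]? = some c := by
      have h0 : (cells.drop i)[0]? = some c := by rw [← h1]; rfl
      rw [List.getElem?_drop] at h0
      simpa using h0
    have hrest' : rest' = cells.drop (i + 1) := by
      have h2 := congrArg (List.drop 1) h1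
      simp only [List.drop_drop] at h2
      simpa [Nat.add_comm] using h2
    have hi_lt : i < cells.length := (List.getElem?_eq_some_iff.mp hget).1
    have hv : (cells.map (pvProj axis)).getD i 0 = pvProj axis c := by
      have hm : (cells.map (pvProj axis))[i]? = some (pvProj axis c) := by
        rw [List.getElem?_map, hget]; rfl
      rw [List.getD_eq_getElem?_getD, hm]; rfl
    have htakes : (cells.map (pvProj axis)).take (i + 1)
        = (cells.map (pvProj axis)).take i ++ [pvProj axis c] := by
      rw [List.take_add_one]
      congr 1
      rw [List.getElem?_map, hget]; rfl
    -- the "continue" transition (no break at i): rs kept, pos possibly set, prev := v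
    have hcontinue : (∀ k, i = k + 1 →
          (cells.map (pvProj axis)).getD (k + 1) 0 = (cells.map (pvProj axis)).getD k 0 + 1) →
        pvScan cells target axis rest' (i + 1) rs
          (if pos = none ∧ pvProj axis c = target then some i else pos) (some (pvProj axis c))
          = connected_segment_py cells target axis := by
      intro hstep
      have hgsI : pvGoStart (cells.map (pvProj axis)) i = rs := by
        by_cases hz : i = 0
        · subst hz; simp [pvGoStart, (hi0 rfl).1]
        · obtain ⟨k2, hk2⟩ : ∃ k2, i = k2 + 1 := ⟨i - 1, by omega⟩
          rw [hk2, pvGoStart_succ_run (hstep k2 hk2)]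
          exact ((hik k2 hk2).2.2).symm
      refine ih _ _ _ _ hrest' (by omega) ?_ ?_ ?_
      · intro k' hk'
        have hk'' : k' = i := by omega
        subst hk''
        exact ⟨hi_lt, by rw [hv], hgsI.symm⟩
      · intro q hq
        by_cases hc : pos = none ∧ pvProj axis c = target
        · rw [if_pos hc] at hq
          have hqi : q = i := (Option.some.inj hq).symm
          subst hqi
          refine ⟨by omega, hi_lt, by rw [hv]; exact hc.2, hnone hc.1, hgsI, ?_⟩
          intro j hj hj'; omega
        · rw [if_neg hc] at hq
          obtain ⟨hqi, hqlen, hval, hnotin, hgs, hcont⟩ := hpos q hq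
          refine ⟨by omega, hqlen, hval, hnotin, hgs, ?_⟩
          intro j hj hj'
          by_cases hji : j + 1 < i
          · exact hcont j hj hji
          · have hij : i = j + 1 := by omega
            exact hstep j hij
      · intro hq
        by_cases hc : pos = none ∧ pvProj axis c = target
        · rw [if_pos hc] at hq; exact absurd hq (by simp)
        · rw [if_neg hc] at hq
          have hnt : pvProj axis c ≠ target := fun h => hc ⟨hq, h⟩
          have hold := hnone hq
          rw [htakes]
          intro hmem
          rcases List.mem_append.mp hmem with h | h
          · exact hold h
          · simp at h; exact hnt h.symm
    by_cases hz : i = 0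
    · obtain ⟨hrs0, hprev0⟩ := hi0 hz
      subst hz hrs0 hprev0
      simp only [pvScan]
      exact hcontinue (fun k hk => by omega)
    · obtain ⟨k, rfl⟩ : ∃ k, i = k + 1 := ⟨i - 1, by omega⟩
      obtain ⟨hklen, hprev, hrs⟩ := hik k rfl
      subst hprev
      simp only [pvScan]
      by_cases hbr : pvProj axis c = (cells.map (pvProj axis)).getD k 0 + 1
      · rw [if_neg (not_not.mpr hbr)]
        refine hcontinue (fun k' hk' => ?_)
        have : k' = k := by omega
        subst this
        rw [hv]; exact hbr
      · rw [if_pos hbr]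
        have hb : (cells.map (pvProj axis)).getD (k + 1) 0
            ≠ (cells.map (pvProj axis)).getD k 0 + 1 := by rw [hv]; exact hbr
        cases pos with
        | none =>
          rw [if_neg (by simp)]
          refine ih _ _ _ _ hrest' (by omega) ?_ ?_ ?_
          · intro k' hk'
            have hk'' : k' = k + 1 := by omega
            subst hk''
            refine ⟨hi_lt, by rw [hv], ?_⟩
            rw [pvGoStart_succ_break hb]
          · intro q hq
            by_cases hvt : pvProj axis c = target
            · rw [if_pos hvt] at hq
              have hqi : q = k + 1 := (Option.some.inj hq).symm
              subst hqi
              refine ⟨by omega, hi_lt, by rw [hv]; exact hvt, hnone rfl,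
                pvGoStart_succ_break hb, ?_⟩
              intro j hj hj'; omega
            · rw [if_neg hvt] at hq; exact absurd hq (by simp)
          · intro hq
            by_cases hvt : pvProj axis c = target
            · rw [if_pos hvt] at hq; exact absurd hq (by simp)
            · rw [if_neg hvt] at hq
              have hold := hnone rfl
              rw [htakes]
              intro hmem
              rcases List.mem_append.mp hmem with h | h
              · exact hold h
              · simp at h; exact hvt h.symm
        | some q =>
          rw [if_pos (by simp)]
          obtain ⟨hqi, hqlen, hval, hnotin, hgs, hcont⟩ := hpos q rfl
          have hmaplen : (cells.map (pvProj axis)).length = cells.length := by simp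
          have hq' : q < (cells.map (pvProj axis)).length := by omega
          have hgete : (cells.map (pvProj axis))[q]? = some target := by
            rw [List.getElem?_eq_getElem hq']
            have h2 := List.getD_eq_getElem (cells.map (pvProj axis)) 0 hq'
            rw [hval] at h2
            exact congrArg some h2.symm
          have hidx : PySem.List.index? (cells.map (pvProj axis)) target = some q :=
            pv_index?_first hgete hnotin
          have hend : pvGoEnd (cells.map (pvProj axis)) (cells.map (pvProj axis)).length q
              = k := by
            apply pvGoEnd_eq
            · omega
            · omega
            · omega
            · intro j hj hj'
              exact hcont j hj (by omega)
            · right; exact hb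
          simp only [connected_segment_py, hidx, hend, hgs]
-- ===== VERDICT (by name: the statement is the Claim_ definition above) =====
theorem connected_segment_py_spec : Claim_equal_connected_segment_py := by
  intro cells target axis _ _
  unfold Spec_connected_segment_py connected_segment_py_alt
  exact (pvScan_eq cells target axis cells 0 0 none none rfl (fun _ => ⟨rfl, rfl⟩)
    (fun k hk => by omega) (fun q hq => by simp at hq) (fun _ => by simp)).symm
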